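-- pv_equiv track=rewrite | github.com/clarkdowner/hackerrank | geetks_for_geeks/mathematical_and_algorithmic_puzzle/jumping_numbers.py | get_jumpers
-- ===== SOURCE A (Python) =====
-- def get_jumpers(val):
--     val_length = len(str(val))
--
--     digits = list(range(1, 10))
--     current_crop = [str(x) for x in digits]
--     jumpers = ['0'] + current_crop
--
--     for i in range(val_length - 1, 0, -1):
--         next_crop = list()
--         for num in current_crop:
--             last_digit = int(num[-1])
--
--             if last_digit > 0:
--                 dec = last_digit - 1
--                 next_crop.append(num + str(dec))
--             if last_digit < 9:
--                 inc = last_digit + 1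
--                 next_crop.append(num + str(inc))
--
--         current_crop = next_crop
--         jumpers.extend(current_crop)
--
--     return list(filter(lambda x: int(x) < val, jumpers))
-- ===== SOURCE B (Python) =====
-- def get_jumpers(val):
--     length = len(str(val))
--
--     def gen(s, k):
--         # all jumping-number strings extending s by k more digits, in ascending order
--         if k == 0:
--             return [s]
--         d = int(s[-1])
--         out = []
--         if d > 0:
--             out += gen(s + str(d - 1), k - 1)
--         if d < 9:
--             out += gen(s + str(d + 1), k - 1)
--         return out
--
--     result = ['0'] if val > 0 else []
--     for k in range(length):
--         for seed in '123456789':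
--             result += [s for s in gen(seed, k) if int(s) < val]
--     return result
-- ===== Notes on version B (the rewrite author's own statement) =====
-- stated objective: alternative
-- what changed: Replaces the iterative level-by-level BFS (keeping a current_crop list and extending a global jumpers list each round, then filtering at the end) by a recursive DFS that, for each extra-digit count below the length of str(val) and each nonzero seed digit, generates the jumping strings of that shape depth-first and filters them inline.
import Mathlib
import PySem

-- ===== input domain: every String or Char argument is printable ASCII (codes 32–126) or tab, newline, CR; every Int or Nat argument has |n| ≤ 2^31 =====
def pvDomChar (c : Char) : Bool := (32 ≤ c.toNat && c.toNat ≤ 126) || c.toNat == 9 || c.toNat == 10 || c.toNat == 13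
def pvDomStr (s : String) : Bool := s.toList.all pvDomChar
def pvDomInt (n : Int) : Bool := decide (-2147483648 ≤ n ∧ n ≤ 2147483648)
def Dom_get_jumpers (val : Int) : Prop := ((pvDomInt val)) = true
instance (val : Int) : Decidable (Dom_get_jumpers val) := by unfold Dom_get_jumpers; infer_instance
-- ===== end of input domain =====

-- B replaces A's iterative level-by-level BFS by a per-length recursive DFS with inline
-- filtering (a different decomposition of the same enumeration; no speed claim).

-- ===== PORT A =====
-- literal port of A's BFS: state (current_crop, jumpers), one fold round per loop iteration;
-- int(num[-1]) / int(x) are ported with PySem.Str.pyGet? / PySem.Int.ofStr? (.getD is never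
-- taken: every string in play is a nonempty digit string, so the Options are always some)
def get_jumpers (val : Int) : List String :=
  let val_length := (PySem.Int.toChars val).length
  let digits := PySem.List.pyRange 1 10 1
  let current_crop := digits.map (fun x => PySem.Int.toStr x)
  let jumpers := "0" :: current_crop
  let st := (PySem.List.pyRange ((val_length : Int) - 1) 0 (-1)).foldl
    (fun (st : List String × List String) (_ : Int) =>
      let next_crop := st.1.foldl
        (fun acc num =>
          let last_digit := (PySem.Int.ofChars? [(PySem.Str.pyGet? num (-1)).getD ' ']).getD 0
          let acc := if last_digit > 0 then acc ++ [num ++ PySem.Int.toStr (last_digit - 1)] else acc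
          let acc := if last_digit < 9 then acc ++ [num ++ PySem.Int.toStr (last_digit + 1)] else acc
          acc) []
      (next_crop, st.2 ++ next_crop))
    (current_crop, jumpers)
  st.2.filter (fun x => decide ((PySem.Int.ofStr? x).getD 0 < val))

-- ===== PORT B =====
-- gen(s, k) of Source B: all jumping strings extending s by k more digits, depth-first
def genB : String → Nat → List String
  | s, 0 => [s]
  | s, k+1 =>
    let d := (PySem.Int.ofChars? [(PySem.Str.pyGet? s (-1)).getD ' ']).getD 0
    (if d > 0 then genB (s ++ PySem.Int.toStr (d - 1)) k else []) ++
    (if d < 9 then genB (s ++ PySem.Int.toStr (d + 1)) k else [])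

def get_jumpers_alt (val : Int) : List String :=
  let length := (PySem.Int.toChars val).length
  (if val > 0 then ["0"] else []) ++
    (List.range length).flatMap (fun k =>
      "123456789".toList.flatMap (fun seed =>
        (genB (String.ofList [seed]) k).filter (fun s => decide ((PySem.Int.ofStr? s).getD 0 < val))))

-- ===== PRECONDITION & SPEC =====
def Spec_get_jumpers (val : Int) (out : List String) : Prop := out = get_jumpers_alt val
instance (val : Int) (out : List String) : Decidable (Spec_get_jumpers val out) := by unfold Spec_get_jumpers; infer_instance

-- ===== CLAIM (what is proved, stated in full; the proofs are below) =====
def Claim_equal_get_jumpers : Prop := ∀ (val : Int), Dom_get_jumpers val → Spec_get_jumpers val (get_jumpers val)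

-- ===== LEMMAS AND PROOFS =====

-- the children of a crop element, as A's inner loop appends them
def pvChildren (num : String) : List String :=
  let last_digit := (PySem.Int.ofChars? [(PySem.Str.pyGet? num (-1)).getD ' ']).getD 0
  (if last_digit > 0 then [num ++ PySem.Int.toStr (last_digit - 1)] else []) ++
  (if last_digit < 9 then [num ++ PySem.Int.toStr (last_digit + 1)] else [])

-- k-fold expansion of a crop (A's current_crop after k rounds)
def pvIter : Nat → List String → List String
  | 0, xs => xs
  | n+1, xs => pvIter n (xs.flatMap pvChildren)

-- A's inner loop builds acc ++ (children of every num)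
lemma pvInnerA (xs : List String) (acc : List String) :
    xs.foldl
      (fun acc num =>
        let last_digit := (PySem.Int.ofChars? [(PySem.Str.pyGet? num (-1)).getD ' ']).getD 0
        let acc := if last_digit > 0 then acc ++ [num ++ PySem.Int.toStr (last_digit - 1)] else acc
        let acc := if last_digit < 9 then acc ++ [num ++ PySem.Int.toStr (last_digit + 1)] else acc
        acc) acc = acc ++ xs.flatMap pvChildren := by
  induction xs generalizing acc with
  | nil => simp
  | cons x xs ih =>
    simp only [List.foldl_cons, List.flatMap_cons, ih, pvChildren]
    split_ifs <;> simp

-- the port's round step, rewritten through pvInnerA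
lemma pvStepEq :
    (fun (st : List String × List String) (_ : Int) =>
      let next_crop := st.1.foldl
        (fun acc num =>
          let last_digit := (PySem.Int.ofChars? [(PySem.Str.pyGet? num (-1)).getD ' ']).getD 0
          let acc := if last_digit > 0 then acc ++ [num ++ PySem.Int.toStr (last_digit - 1)] else acc
          let acc := if last_digit < 9 then acc ++ [num ++ PySem.Int.toStr (last_digit + 1)] else acc
          acc) []
      (next_crop, st.2 ++ next_crop))
    = (fun (st : List String × List String) (_ : Int) =>
        (st.1.flatMap pvChildren, st.2 ++ st.1.flatMap pvChildren)) := by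
  funext st x
  simp only [pvInnerA, List.nil_append]

-- A's outer loop: l.length rounds of expansion, each round's crop appended to jumpers
lemma pvOuterA (l : List Int) : ∀ (c j : List String),
    l.foldl
      (fun (st : List String × List String) (_ : Int) =>
        (st.1.flatMap pvChildren, st.2 ++ st.1.flatMap pvChildren)) (c, j)
    = (pvIter l.length c, j ++ (List.range l.length).flatMap (fun k => pvIter (k + 1) c)) := by
  induction l with
  | nil => intro c j; simp [pvIter]
  | cons x l ih =>
    intro c j
    simp only [List.foldl_cons, ih, List.length_cons]
    refine Prod.ext ?_ ?_
    · rfl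
    · show j ++ c.flatMap pvChildren ++ _ = _
      rw [List.range_succ_eq_map]
      simp only [List.flatMap_cons, List.flatMap_map]
      rw [List.append_assoc]
      rfl

-- Source B's gen at depth k+1 recurses exactly over A's children
lemma pvGenB_children (s : String) (k : Nat) :
    genB s (k + 1) = (pvChildren s).flatMap (fun t => genB t k) := by
  show (let d := (PySem.Int.ofChars? [(PySem.Str.pyGet? s (-1)).getD ' ']).getD 0
    (if d > 0 then genB (s ++ PySem.Int.toStr (d - 1)) k else []) ++
    (if d < 9 then genB (s ++ PySem.Int.toStr (d + 1)) k else [])) = _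
  simp only [pvChildren]
  split_ifs <;> simp

-- BFS level k = concatenation of the DFS subtrees of depth k
lemma pvIter_flatMap (k : Nat) : ∀ (xs : List String),
    pvIter k xs = xs.flatMap (fun s => genB s k) := by
  induction k with
  | zero => intro xs; simp [pvIter, genB]
  | succ k ih =>
    intro xs
    show pvIter k (xs.flatMap pvChildren) = _
    rw [ih, List.flatMap_assoc]
    refine List.flatMap_congr (fun s _ => ?_)
    exact (pvGenB_children s k).symm

lemma pvToDigitsCore_len (b : Nat) : ∀ (fuel n : Nat) (ds : List Char),
    ds.length ≤ (Nat.toDigitsCore b fuel n ds).length ∧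
      (0 < fuel → ds.length < (Nat.toDigitsCore b fuel n ds).length) := by
  intro fuel
  induction fuel with
  | zero => intro n ds; simp [Nat.toDigitsCore]
  | succ fuel ih =>
    intro n ds
    rw [Nat.toDigitsCore]
    split
    · simp
    · have := (ih (n / b) (Nat.digitChar (n % b) :: ds)).1
      simp only [List.length_cons] at this
      omega

lemma pvToChars_len_pos (n : Int) : 1 ≤ (PySem.Int.toChars n).length := by
  unfold PySem.Int.toChars
  split
  · simp
  · have := (pvToDigitsCore_len 10 (n.toNat + 1) n.toNat []).2 (by omega)
    simpa [Nat.toDigits] using this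

lemma pvSeedsA : (PySem.List.pyRange 1 10 1).map (fun x => PySem.Int.toStr x)
    = ["1", "2", "3", "4", "5", "6", "7", "8", "9"] := by decide

theorem get_jumpers_spec_aux (val : Int) : get_jumpers val = get_jumpers_alt val := by
  simp only [get_jumpers, get_jumpers_alt]
  rw [pvStepEq, pvOuterA]
  set L := (PySem.Int.toChars val).length with hLdef
  have hL : 1 ≤ L := pvToChars_len_pos val
  have hlen : (PySem.List.pyRange ((L : Int) - 1) 0 (-1)).length = L - 1 := by
    rw [PySem.List.length_pyRange_neg_one]; omega
  rw [hlen]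
  -- assemble "0" :: all blocks k = 0 .. L-1
  have hsplit : (L - 1) + 1 = L := by omega
  have hblocks :
      ("0" :: (PySem.List.pyRange 1 10 1).map (fun x => PySem.Int.toStr x)) ++
        (List.range (L - 1)).flatMap
          (fun k => pvIter (k + 1) ((PySem.List.pyRange 1 10 1).map (fun x => PySem.Int.toStr x)))
      = "0" :: (List.range L).flatMap
          (fun k => pvIter k ((PySem.List.pyRange 1 10 1).map (fun x => PySem.Int.toStr x))) := by
    rw [← hsplit, List.range_succ_eq_map]
    simp only [List.flatMap_cons, List.flatMap_map]
    rfl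
  rw [hblocks]
  rw [List.filter_cons]
  have h0 : (decide ((PySem.Int.ofStr? "0").getD 0 < val)) = decide (val > 0) := by
    have : (PySem.Int.ofStr? "0").getD 0 = 0 := by decide
    rw [this]
  rw [h0]
  have hrest :
      ((List.range L).flatMap
          (fun k => pvIter k ((PySem.List.pyRange 1 10 1).map (fun x => PySem.Int.toStr x)))).filter
        (fun x => decide ((PySem.Int.ofStr? x).getD 0 < val))
      = (List.range L).flatMap (fun k =>
          "123456789".toList.flatMap (fun seed =>
            (genB (String.ofList [seed]) k).filter
              (fun s => decide ((PySem.Int.ofStr? s).getD 0 < val)))) := by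
    rw [List.filter_flatMap]
    refine List.flatMap_congr (fun k _ => ?_)
    rw [pvIter_flatMap, pvSeedsA, List.filter_flatMap]
    rfl
  rw [hrest]
  by_cases hv : val > 0
  · simp [hv]
  · simp [hv]

-- ===== VERDICT (by name: the statement is the Claim_ definition above) =====
theorem get_jumpers_spec : Claim_equal_get_jumpers := by
  intro val _
  show get_jumpers val = get_jumpers_alt val
  exact get_jumpers_spec_aux val
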